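-- pv_equiv track=rewrite | github.com/hypergirl666/test | bot/utils/day_utils.py | days_to_russian
-- ===== SOURCE A (Python) =====
-- def days_to_russian(days_string: str) -> str:
--     """
--     Преобразует строку с английскими днями недели в русские сокращения.
--     Сначала сортирует дни в порядке планировщика (mon,tue,wed,thu,fri,sat,sun),
--     затем переводит в русские сокращения.
--
--     Args:
--         days_string: строка с днями (например, 'tue,wed,thu,fri')
--
--     Returns:
--         str: строка с русскими сокращениями (например, 'ВТ,СР,ЧТ,ПТ')
--     """
--     if not days_string:
--         return ""
--
--     # Маппинг английских дней на русские сокращения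
--     day_mapping = {
--         'mon': 'ПН',
--         'tue': 'ВТ',
--         'wed': 'СР',
--         'thu': 'ЧТ',
--         'fri': 'ПТ',
--         'sat': 'СБ',
--         'sun': 'ВС'
--     }
--
--     # Порядок сортировки для планировщика (mon=1, tue=2, ..., sun=0)
--     sort_order = {
--         'mon': 1, 'tue': 2, 'wed': 3, 'thu': 4,
--         'fri': 5, 'sat': 6, 'sun': 0
--     }
--
--     # Разбиваем строку на отдельные дни
--     days = days_string.split(',')
--
--     # Сортируем дни в порядке планировщика
--     sorted_days = sorted(days, key=lambda x: sort_order.get(x.strip(), 0))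
--
--     # Преобразуем каждый день в русские сокращения
--     russian_days = []
--     for day in sorted_days:
--         day = day.strip()
--         if day in day_mapping:
--             russian_days.append(day_mapping[day])
--         else:
--             # Если день не распознан, оставляем как есть
--             russian_days.append(day)
--
--     return ','.join(russian_days)
-- ===== SOURCE B (Python) =====
-- def days_to_russian(days_string: str) -> str:
--     if not days_string:
--         return ""
--     day_mapping = {
--         'mon': 'ПН', 'tue': 'ВТ', 'wed': 'СР', 'thu': 'ЧТ',
--         'fri': 'ПТ', 'sat': 'СБ', 'sun': 'ВС'
--     }
--     sort_order = {
--         'mon': 1, 'tue': 2, 'wed': 3, 'thu': 4,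
--         'fri': 5, 'sat': 6, 'sun': 0
--     }
--     # strip once, then one bucket pass per scheduler value 0..6 (stable by construction)
--     toks = [t.strip() for t in days_string.split(',')]
--     ordered = []
--     for v in range(7):
--         for t in toks:
--             if sort_order.get(t, 0) == v:
--                 ordered.append(t)
--     return ','.join(day_mapping.get(t, t) for t in ordered)
-- ===== Notes on version B (the rewrite author's own statement) =====
-- stated objective: alternative
-- what changed: Replaces the stable sorted() call by a counting-bucket pass: tokens are stripped once, then for each scheduler value 0..6 the token list is scanned in original order collecting that bucket, which reproduces stable-sort order by construction.
import Mathlib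
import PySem

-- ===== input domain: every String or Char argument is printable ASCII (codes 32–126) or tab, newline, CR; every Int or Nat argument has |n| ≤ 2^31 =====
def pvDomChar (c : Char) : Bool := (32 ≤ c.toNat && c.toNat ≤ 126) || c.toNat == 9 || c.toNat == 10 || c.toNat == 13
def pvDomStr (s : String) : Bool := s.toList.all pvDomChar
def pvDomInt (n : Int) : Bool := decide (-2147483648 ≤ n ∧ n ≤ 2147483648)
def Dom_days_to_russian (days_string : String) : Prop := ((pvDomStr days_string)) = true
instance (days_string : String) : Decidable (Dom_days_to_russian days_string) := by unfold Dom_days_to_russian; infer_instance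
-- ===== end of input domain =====

-- B replaces A's stable sorted() call by a strip-once, bucket-per-scheduler-value pass (alternative decomposition, same results).


-- ===== PORT A =====
def pvDayMapping : PySem.Dict String String :=
  PySem.Dict.ofList [("mon","ПН"),("tue","ВТ"),("wed","СР"),("thu","ЧТ"),("fri","ПТ"),("sat","СБ"),("sun","ВС")]

def pvSortOrder : PySem.Dict String Int :=
  PySem.Dict.ofList [("mon",1),("tue",2),("wed",3),("thu",4),("fri",5),("sat",6),("sun",0)]

-- split? "," is never none (the separator is a nonempty literal), so .getD [] is exact
def days_to_russian (days_string : String) : String :=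
  if days_string == "" then ""
  else
    let days := (PySem.Str.split? days_string ",").getD []
    let sortedDays := PySem.List.sorted days (fun x => PySem.Dict.getD pvSortOrder (PySem.Str.strip x) 0)
    let russianDays := sortedDays.foldl (fun acc day =>
      let d := PySem.Str.strip day
      acc ++ [match PySem.Dict.get? pvDayMapping d with
              | some r => r
              | none => d]) []
    PySem.Str.join "," russianDays

-- ===== PORT B =====
def days_to_russian_alt (days_string : String) : String :=
  if days_string == "" then ""
  else
    let toks := ((PySem.Str.split? days_string ",").getD []).map PySem.Str.strip
    let ordered := (PySem.List.pyRange 0 7 1).flatMap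
      (fun v => toks.filter (fun t => PySem.Dict.getD pvSortOrder t 0 == v))
    PySem.Str.join "," (ordered.map (fun t => PySem.Dict.getD pvDayMapping t t))

-- ===== PRECONDITION & SPEC =====
def Spec_days_to_russian (days_string : String) (out : String) : Prop := out = days_to_russian_alt days_string
instance (days_string : String) (out : String) : Decidable (Spec_days_to_russian days_string out) := by unfold Spec_days_to_russian; infer_instance

-- ===== CLAIM (what is proved, stated in full; the proofs are below) =====
def Claim_equal_days_to_russian : Prop := ∀ (days_string : String), Dom_days_to_russian days_string → Spec_days_to_russian days_string (days_to_russian days_string)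

-- ===== LEMMAS AND PROOFS =====

-- inserting x into a block of elements it does not go before skips the block
theorem pv_insertBy_append_left {α : Type} (before : α → α → Bool) (x : α) (L1 L2 : List α)
    (h : ∀ y ∈ L1, before x y = false) :
    PySem.List.insertBy before x (L1 ++ L2) = L1 ++ PySem.List.insertBy before x L2 := by
  induction L1 with
  | nil => simp
  | cons a t ih =>
      have ha : before x a = false := h a (by simp)
      rw [List.cons_append]
      cases ht : t ++ L2 with
      | nil =>
          rcases List.append_eq_nil_iff.mp ht with ⟨ht1, ht2⟩
          subst ht1; subst ht2
          simp [PySem.List.insertBy, ha]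
      | cons b u =>
          rw [PySem.List.insertBy, ha, ← ht,
            ih (fun y hy => h y (by simp [hy]))]
          simp

-- x goes in front of a list all of whose elements it goes before
theorem pv_insertBy_front {α : Type} (before : α → α → Bool) (x : α) (L : List α)
    (h : ∀ y ∈ L, before x y = true) :
    PySem.List.insertBy before x L = x :: L := by
  cases L with
  | nil => rfl
  | cons a t => simp [PySem.List.insertBy, h a (by simp)]

-- stable insertion into a bucket decomposition lands at the end of its own bucket
theorem pv_insertBy_flatMap {α : Type} (key : α → Int) (x : α) (vs : List Int) (g : Int → List α)
    (hg : ∀ v, ∀ y ∈ g v, key y = v) (hx : key x ∈ vs) (hs : vs.Pairwise (· < ·)) :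
    PySem.List.insertBy (fun a b => decide (key a < key b)) x (vs.flatMap g)
      = vs.flatMap (fun v => g v ++ if key x = v then [x] else []) := by
  induction vs with
  | nil => simp at hx
  | cons v vs ih =>
      have hlt : ∀ w ∈ vs, v < w := fun w hw => (List.pairwise_cons.mp hs).1 w hw
      by_cases hveq : key x = v
      · have h1 : ∀ y ∈ g v, (fun a b => decide (key a < key b)) x y = false := by
          intro y hy; simp [hg v y hy, hveq]
        have h2 : ∀ y ∈ vs.flatMap g, (fun a b => decide (key a < key b)) x y = true := by
          intro y hy
          rcases List.mem_flatMap.mp hy with ⟨w, hw, hyw⟩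
          simp only [hg w y hyw, hveq, decide_eq_true_eq]
          exact hlt w hw
        have htail : vs.flatMap (fun w => g w ++ if key x = w then [x] else []) = vs.flatMap g := by
          apply List.flatMap_congr
          intro w hw
          have : key x ≠ w := by have := hlt w hw; omega
          simp [this]
        rw [List.flatMap_cons, pv_insertBy_append_left _ x (g v) (vs.flatMap g) h1,
          pv_insertBy_front _ x (vs.flatMap g) h2, List.flatMap_cons, htail, if_pos hveq]
        simp
      · have hx' : key x ∈ vs := by
          rcases List.mem_cons.mp hx with h | h
          · exact absurd h hveq
          · exact h
        have hgt : v < key x := hlt _ hx'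
        have h1 : ∀ y ∈ g v, (fun a b => decide (key a < key b)) x y = false := by
          intro y hy; simp only [hg v y hy, decide_eq_false_iff_not]; omega
        rw [List.flatMap_cons, pv_insertBy_append_left _ x (g v) (vs.flatMap g) h1,
          ih hx' (List.pairwise_cons.mp hs).2, List.flatMap_cons, if_neg hveq]
        simp

-- a stable sort whose keys all lie in a strictly increasing value list is the bucket concatenation
theorem pv_sorted_eq_buckets {α : Type} (key : α → Int) (xs : List α) (vs : List Int)
    (hb : ∀ x ∈ xs, key x ∈ vs) (hs : vs.Pairwise (· < ·)) :
    PySem.List.sorted xs key false = vs.flatMap (fun v => xs.filter (fun x => key x == v)) := by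
  induction xs using List.reverseRecOn with
  | nil => simp [PySem.List.sorted]
  | append_singleton xs x ih =>
      have hb' : ∀ y ∈ xs, key y ∈ vs := fun y hy => hb y (by simp [hy])
      rw [PySem.List.sorted_eq_foldl_insertBy, List.foldl_append, List.foldl_cons, List.foldl_nil,
        ← PySem.List.sorted_eq_foldl_insertBy, ih hb',
        pv_insertBy_flatMap key x vs (fun v => xs.filter (fun y => key y == v))
          (fun v y hy => by simpa using (List.mem_filter.mp hy).2)
          (hb x (by simp)) hs]
      apply List.flatMap_congr
      intro v hv
      by_cases h : key x = v <;> simp [h]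

-- every scheduler key is one of 0..6
theorem pv_key_mem (s : String) : PySem.Dict.getD pvSortOrder s 0 ∈ ([0,1,2,3,4,5,6] : List Int) := by
  have h : pvSortOrder.items
      = [("mon",1),("tue",2),("wed",3),("thu",4),("fri",5),("sat",6),("sun",0)] := by decide
  simp only [PySem.Dict.getD, PySem.Dict.get?, h, List.find?]
  cases h1 : "mon" == s <;> cases h2 : "tue" == s <;> cases h3 : "wed" == s <;>
    cases h4 : "thu" == s <;> cases h5 : "fri" == s <;> cases h6 : "sat" == s <;>
    cases h7 : "sun" == s <;> simp

-- ===== VERDICT (by name: the statement is the Claim_ definition above) =====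
theorem days_to_russian_spec : Claim_equal_days_to_russian := by
  intro s _
  show days_to_russian s = days_to_russian_alt s
  unfold days_to_russian days_to_russian_alt
  by_cases hs : s == ""
  · simp [hs]
  · simp only [hs, if_false, Bool.false_eq_true]
    rw [PySem.List.foldl_append_singleton_eq_map]
    rw [pv_sorted_eq_buckets (fun x => PySem.Dict.getD pvSortOrder (PySem.Str.strip x) 0)
      ((PySem.Str.split? s ",").getD []) ([0,1,2,3,4,5,6] : List Int)
      (fun x _ => pv_key_mem (PySem.Str.strip x)) (by decide)]
    have hrange : PySem.List.pyRange 0 7 1 = ([0,1,2,3,4,5,6] : List Int) := by decide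
    rw [hrange]
    congr 1
    simp only [List.nil_append, List.map_flatMap]
    apply List.flatMap_congr
    intro v _
    rw [List.filter_map, List.map_map]
    simp only [Function.comp_def, PySem.Dict.getD]
    apply List.map_congr_left
    intro day _
    cases pvDayMapping.get? (PySem.Str.strip day) <;> rfl
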